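-- pv_equiv track=rewrite | github.com/AhmedAlDiab/HostDiscovery | HostDiscovery.py | normalize_custom_port_syntax
-- ===== SOURCE A (Python) =====
-- from typing import List, Sequence, Set, Tuple
--
-- def normalize_custom_port_syntax(argv: Sequence[str]) -> List[str]:
--     normalized: List[str] = []
--     i = 0
--     while i < len(argv):
--         arg = argv[i]
--         if arg.startswith("-tcp") and arg not in ("-tcp", "--tcp"):
--             spec = arg[4:]
--             if not spec:
--                 raise ValueError("Missing TCP port specification after -tcp.")
--             normalized.extend(["--tcp", spec])
--         elif arg in ("-tcp", "--tcp"):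
--             if i + 1 >= len(argv):
--                 raise ValueError("Missing TCP port specification after -tcp/--tcp.")
--             normalized.extend(["--tcp", argv[i + 1]])
--             i += 1
--         elif arg.startswith("-udp") and arg not in ("-udp", "--udp"):
--             spec = arg[4:]
--             if not spec:
--                 raise ValueError("Missing UDP port specification after -udp.")
--             normalized.extend(["--udp", spec])
--         elif arg in ("-udp", "--udp"):
--             if i + 1 >= len(argv):
--                 raise ValueError("Missing UDP port specification after -udp/--udp.")
--             normalized.extend(["--udp", argv[i + 1]])
--             i += 1
--         else:
--             normalized.append(arg)
--         i += 1
--     return normalized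
-- ===== SOURCE B (Python) =====
-- from typing import List, Sequence
--
-- # Table mapping every flag spelling to its canonical long form.
-- FLAGS = {"-tcp": "--tcp", "--tcp": "--tcp", "-udp": "--udp", "--udp": "--udp"}
--
-- def normalize_custom_port_syntax(argv: Sequence[str]) -> List[str]:
--     # State machine over argv: `pending` remembers that the previous token was
--     # a bare flag whose port specification is still owed.
--     out: List[str] = []
--     pending = None
--     for arg in argv:
--         if pending is not None:
--             out.append(arg)          # the owed port spec, taken verbatim
--             pending = None
--         elif arg in FLAGS:
--             pending = FLAGS[arg]
--             out.append(pending)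
--         elif arg[:4] in ("-tcp", "-udp"):
--             out.append("-" + arg[:4])
--             out.append(arg[4:])
--         else:
--             out.append(arg)
--     if pending is not None:
--         p = pending[2:]
--         raise ValueError("Missing %s port specification after -%s/--%s." % (p.upper(), p, p))
--     return out
-- ===== Notes on version B (the rewrite author's own statement) =====
-- stated objective: idiomatic
-- what changed: A's index-based while loop with explicit lookahead (i+1) and four hand-written branches is replaced by a table-driven finite state machine: a plain for-loop over argv with a 'pending' state that remembers an owed port spec, a flag->long-form dict, and the missing-spec error deferred to after the loop.
import Mathlib
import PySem

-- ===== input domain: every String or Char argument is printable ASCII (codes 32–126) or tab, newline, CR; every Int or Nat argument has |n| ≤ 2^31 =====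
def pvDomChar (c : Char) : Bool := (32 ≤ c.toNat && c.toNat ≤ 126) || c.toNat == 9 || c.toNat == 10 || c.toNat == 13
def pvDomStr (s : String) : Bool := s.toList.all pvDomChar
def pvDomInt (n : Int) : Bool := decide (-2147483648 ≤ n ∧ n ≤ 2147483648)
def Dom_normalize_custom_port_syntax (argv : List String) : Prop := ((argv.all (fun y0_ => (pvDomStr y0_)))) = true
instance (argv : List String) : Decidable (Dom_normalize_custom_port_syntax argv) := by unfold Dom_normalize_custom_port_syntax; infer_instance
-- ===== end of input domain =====

-- B replaces A's index/lookahead while-loop by a table-driven state machine: one for-loop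
-- with a 'pending' state, the flag table as a dict, and the error check after the loop (objective: idiomatic).

-- ===== PORT A =====
-- A's while loop over an index that only moves forward becomes recursion on the remaining argv;
-- the 'raise ValueError' points stop and yield nothing further (Pre_ excludes them).
def normalize_custom_port_syntax : List String → List String
  | [] => []
  | arg :: rest =>
    if PySem.Str.startswith arg "-tcp" && !(arg == "-tcp" || arg == "--tcp") then
      let spec := PySem.Str.slice arg (some 4) none
      if spec == "" then []
      else "--tcp" :: spec :: normalize_custom_port_syntax rest
    else if arg == "-tcp" || arg == "--tcp" then
      match rest with
      | [] => []
      | nxt :: rest' => "--tcp" :: nxt :: normalize_custom_port_syntax rest'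
    else if PySem.Str.startswith arg "-udp" && !(arg == "-udp" || arg == "--udp") then
      let spec := PySem.Str.slice arg (some 4) none
      if spec == "" then []
      else "--udp" :: spec :: normalize_custom_port_syntax rest
    else if arg == "-udp" || arg == "--udp" then
      match rest with
      | [] => []
      | nxt :: rest' => "--udp" :: nxt :: normalize_custom_port_syntax rest'
    else arg :: normalize_custom_port_syntax rest

-- ===== PORT B =====
-- the module-level FLAGS dict of Source B
def pvFlags : PySem.Dict String String :=
  PySem.Dict.ofList [("-tcp", "--tcp"), ("--tcp", "--tcp"), ("-udp", "--udp"), ("--udp", "--udp")]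

-- one iteration of Source B's for-loop: state = (out, pending)
def pvStep (s : List String × Option String) (arg : String) : List String × Option String :=
  match s with
  | (out, some _) => (out ++ [arg], none)
  | (out, none) =>
    match PySem.Dict.get? pvFlags arg with
    | some long => (out ++ [long], some long)
    | none =>
      let head := PySem.Str.slice arg none (some 4)
      if head == "-tcp" || head == "-udp" then
        (out ++ ["-" ++ head, PySem.Str.slice arg (some 4) none], none)
      else (out ++ [arg], none)

-- the final 'if pending is not None: raise' yields no value; Pre_ excludes it, the port returns out
def normalize_custom_port_syntax_alt (argv : List String) : List String :=
  (argv.foldl pvStep ([], none)).1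

-- ===== PRECONDITION & SPEC =====
def pvIsFlag (s : String) : Bool := s == "-tcp" || s == "--tcp" || s == "-udp" || s == "--udp"

-- CLI grammar: every bare flag token the scan reaches must be followed by a port argument
def pvGrammarOk : List String → Bool
  | [] => true
  | a :: rest =>
    if pvIsFlag a then
      match rest with
      | [] => false
      | _ :: t => pvGrammarOk t
    else pvGrammarOk rest

-- Pre_ excludes exactly the inputs on which Python A raises ValueError: a bare
-- -tcp/--tcp/-udp/--udp flag reached by the scan with no following port argument.
def Pre_normalize_custom_port_syntax (argv : List String) : Prop := pvGrammarOk argv = true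
instance (argv : List String) : Decidable (Pre_normalize_custom_port_syntax argv) := by
  unfold Pre_normalize_custom_port_syntax; infer_instance

def pvWitness_normalize_custom_port_syntax : List String := ["-tcp", "80,443", "-udp53", "host"]

def Spec_normalize_custom_port_syntax (argv : List String) (out : List String) : Prop := out = normalize_custom_port_syntax_alt argv
instance (argv : List String) (out : List String) : Decidable (Spec_normalize_custom_port_syntax argv out) := by unfold Spec_normalize_custom_port_syntax; infer_instance

-- ===== CLAIM (what is proved, stated in full; the proofs are below) =====
def Claim_equal_normalize_custom_port_syntax : Prop := ∀ (argv : List String), Dom_normalize_custom_port_syntax argv → Pre_normalize_custom_port_syntax argv → Spec_normalize_custom_port_syntax argv (normalize_custom_port_syntax argv)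

-- ===== LEMMAS AND PROOFS =====
-- unfolding lemmas for the two pattern-matching definitions at a generic cons cell
theorem pvA_cons (arg : String) (rest : List String) :
    normalize_custom_port_syntax (arg :: rest) =
    (if PySem.Str.startswith arg "-tcp" && !(arg == "-tcp" || arg == "--tcp") then
      if PySem.Str.slice arg (some 4) none == "" then []
      else "--tcp" :: PySem.Str.slice arg (some 4) none :: normalize_custom_port_syntax rest
    else if arg == "-tcp" || arg == "--tcp" then
      match rest with
      | [] => []
      | nxt :: rest' => "--tcp" :: nxt :: normalize_custom_port_syntax rest'
    else if PySem.Str.startswith arg "-udp" && !(arg == "-udp" || arg == "--udp") then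
      if PySem.Str.slice arg (some 4) none == "" then []
      else "--udp" :: PySem.Str.slice arg (some 4) none :: normalize_custom_port_syntax rest
    else if arg == "-udp" || arg == "--udp" then
      match rest with
      | [] => []
      | nxt :: rest' => "--udp" :: nxt :: normalize_custom_port_syntax rest'
    else arg :: normalize_custom_port_syntax rest) := by
  cases rest with | nil => rfl | cons a t => rfl

theorem pvG_cons (a : String) (rest : List String) :
    pvGrammarOk (a :: rest) =
    (if pvIsFlag a then
      match rest with
      | [] => false
      | _ :: t => pvGrammarOk t
    else pvGrammarOk rest) := by
  cases rest with | nil => rfl | cons x t => rfl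

-- an attached spec "-tcpXYZ"/"-udpXYZ" is nonempty: A's empty-spec raise is unreachable
theorem pv_spec_ne_empty (arg p : String)
    (h : PySem.Str.startswith arg p = true) (hne : arg ≠ p) :
    (PySem.Str.slice arg (some (p.toList.length : Int)) none == "") = false := by
  rw [Bool.eq_false_iff]
  intro hc
  have heq : PySem.Str.slice arg (some (p.toList.length : Int)) none = "" := eq_of_beq hc
  have hdrop : arg.toList.drop p.toList.length = [] := by
    have h2 := congrArg String.toList heq
    simpa [PySem.Str.toList_slice, PySem.Chars.slice_eq_listSlice,
      PySem.List.slice_from_natCast] using h2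
  have hp : p.toList <+: arg.toList := by
    rw [PySem.Str.startswith_eq] at h
    exact (PySem.Chars.startswith_iff _ _).mp h
  obtain ⟨t, ht⟩ := hp
  apply hne
  have ht0 : t = [] := by
    rw [← ht] at hdrop
    simpa using hdrop
  apply String.toList_injective
  rw [← ht, ht0, List.append_nil]

-- startswith p (|p| = 4) coincides with comparing the 4-char head slice
theorem pv_sw_head (arg p : String) (hp : p.toList.length = 4) :
    (PySem.Str.slice arg none (some 4) == p) = PySem.Str.startswith arg p := by
  have h4 : PySem.List.slice arg.toList none (some 4) = arg.toList.take 4 := by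
    simp [pysem]
  rw [PySem.Str.startswith_eq]
  by_cases h : PySem.Chars.startswith arg.toList p.toList = true
  · have hpre := (PySem.Chars.startswith_iff _ _).mp h
    rw [h, beq_iff_eq]
    apply String.toList_injective
    rw [PySem.Str.toList_slice, PySem.Chars.slice_eq_listSlice, h4]
    rw [List.prefix_iff_eq_take] at hpre
    rw [← hp]; exact hpre.symm
  · rw [Bool.not_eq_true] at h
    rw [h, Bool.eq_false_iff]
    intro hc
    have := eq_of_beq hc
    have htake : arg.toList.take 4 = p.toList := by
      have h2 := congrArg String.toList this
      rw [PySem.Str.toList_slice, PySem.Chars.slice_eq_listSlice, h4] at h2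
      exact h2
    have : PySem.Chars.startswith arg.toList p.toList = true := by
      rw [PySem.Chars.startswith_iff, List.prefix_iff_eq_take, hp, htake]
    rw [h] at this; cases this

theorem pv_main : ∀ (n : Nat) (argv : List String), argv.length ≤ n →
    pvGrammarOk argv = true →
    ∀ (out : List String),
      (argv.foldl pvStep (out, none)).1 = out ++ normalize_custom_port_syntax argv := by
  intro n
  induction n with
  | zero =>
    intro argv hlen _ out
    have : argv = [] := List.length_eq_zero_iff.mp (Nat.le_zero.mp hlen)
    subst this
    simp [normalize_custom_port_syntax]
  | succ n ih =>
    intro argv hlen hg out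
    cases argv with
    | nil => simp [normalize_custom_port_syntax]
    | cons arg rest =>
      simp only [List.length_cons, Nat.succ_le_succ_iff] at hlen
      by_cases hflag : pvIsFlag arg = true
      · -- bare flag: grammar forces a successor; both consume two tokens
        cases rest with
        | nil => exfalso; rw [pvG_cons, hflag] at hg; simp at hg
        | cons nxt rest' =>
          have hg' : pvGrammarOk rest' = true := by
            rw [pvG_cons, hflag] at hg; simpa using hg
          have hlen' : rest'.length ≤ n := by simp at hlen; omega
          have hget : ∃ long, PySem.Dict.get? pvFlags arg = some long ∧
              normalize_custom_port_syntax (arg :: nxt :: rest') =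
                long :: nxt :: normalize_custom_port_syntax rest' := by
            simp only [pvIsFlag] at hflag
            have hnsw1 : PySem.Chars.startswith ['-','u','d','p'] ['-','t','c','p'] = false := by decide
            have hnsw2 : PySem.Chars.startswith ['-','-','u','d','p'] ['-','t','c','p'] = false := by decide
            rcases (by simpa using hflag :
                ((arg = "-tcp" ∨ arg = "--tcp") ∨ arg = "-udp") ∨ arg = "--udp")
              with ((h | h) | h) | h <;> subst h
            · exact ⟨"--tcp", by decide, by simp [normalize_custom_port_syntax]⟩
            · exact ⟨"--tcp", by decide, by simp [normalize_custom_port_syntax]⟩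
            · exact ⟨"--udp", by decide, by simp [normalize_custom_port_syntax, hnsw1]⟩
            · exact ⟨"--udp", by decide, by simp [normalize_custom_port_syntax, hnsw2]⟩
          obtain ⟨long, hget, hA⟩ := hget
          rw [hA]
          simp only [List.foldl_cons, pvStep, hget]
          rw [ih rest' hlen' hg' (out ++ [long] ++ [nxt])]
          simp
      · -- not a bare flag
        simp only [Bool.not_eq_true] at hflag
        have hg' : pvGrammarOk rest = true := by
          rw [pvG_cons, hflag] at hg; simpa using hg
        have hIH := ih rest hlen hg'
        simp only [pvIsFlag] at hflag
        have hne : arg ≠ "-tcp" ∧ arg ≠ "--tcp" ∧ arg ≠ "-udp" ∧ arg ≠ "--udp" := by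
          refine ⟨?_, ?_, ?_, ?_⟩ <;> (intro e; subst e; simp at hflag)
        have hget : PySem.Dict.get? pvFlags arg = none := by
          rw [show pvFlags = PySem.Dict.mk [("-tcp", "--tcp"), ("--tcp", "--tcp"),
            ("-udp", "--udp"), ("--udp", "--udp")] from by decide]
          simp [PySem.Dict.get?, Ne.symm hne.1, Ne.symm hne.2.1,
            Ne.symm hne.2.2.1, Ne.symm hne.2.2.2]
        rw [pvA_cons]
        by_cases htcp : PySem.Str.startswith arg "-tcp" = true
        · -- attached -tcpSPEC
          have htcp' : PySem.Chars.startswith arg.toList ['-','t','c','p'] = true := by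
            simpa using htcp
          have hhead : (PySem.Str.slice arg none (some 4) == "-tcp") = true := by
            rw [pv_sw_head arg "-tcp" (by decide)]; exact htcp
          have hheadeq : PySem.Str.slice arg none (some 4) = "-tcp" := eq_of_beq hhead
          have hspec : (PySem.Str.slice arg (some 4) none == "") = false := by
            have := pv_spec_ne_empty arg "-tcp" htcp hne.1
            simpa using this
          rw [if_pos (by simp [htcp', hne.1, hne.2.1])]
          simp only [hspec]
          simp only [List.foldl_cons, pvStep, hget, hheadeq]
          rw [if_pos (by decide)]
          rw [hIH]
          simp
        · have htcp' : PySem.Chars.startswith arg.toList ['-','t','c','p'] = false := by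
            simpa using htcp
          by_cases hudp : PySem.Str.startswith arg "-udp" = true
          · -- attached -udpSPEC
            have hudp' : PySem.Chars.startswith arg.toList ['-','u','d','p'] = true := by
              simpa using hudp
            have hhead : (PySem.Str.slice arg none (some 4) == "-udp") = true := by
              rw [pv_sw_head arg "-udp" (by decide)]; exact hudp
            have hheadeq : PySem.Str.slice arg none (some 4) = "-udp" := eq_of_beq hhead
            have hhead2 : (PySem.Str.slice arg none (some 4) == "-tcp") = false := by
              rw [hheadeq]; decide
            have hspec : (PySem.Str.slice arg (some 4) none == "") = false := by
              have := pv_spec_ne_empty arg "-udp" hudp hne.2.2.1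
              simpa using this
            rw [if_neg (by simp [htcp'])]
            rw [if_neg (by simp [hne.1, hne.2.1])]
            rw [if_pos (by simp [hudp', hne.2.2.1, hne.2.2.2])]
            simp only [hspec]
            simp only [List.foldl_cons, pvStep, hget, hheadeq]
            rw [if_pos (by decide)]
            rw [hIH]
            simp
          · -- plain argument
            have hudp' : PySem.Chars.startswith arg.toList ['-','u','d','p'] = false := by
              simpa using hudp
            have hhead1 : (PySem.Str.slice arg none (some 4) == "-tcp") = false := by
              rw [pv_sw_head arg "-tcp" (by decide)]; simpa using htcp
            have hhead2 : (PySem.Str.slice arg none (some 4) == "-udp") = false := by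
              rw [pv_sw_head arg "-udp" (by decide)]; simpa using hudp
            rw [if_neg (by simp [htcp'])]
            rw [if_neg (by simp [hne.1, hne.2.1])]
            rw [if_neg (by simp [hudp'])]
            rw [if_neg (by simp [hne.2.2.1, hne.2.2.2])]
            simp only [List.foldl_cons, pvStep, hget]
            rw [if_neg (by simp [hhead1, hhead2])]
            rw [hIH]
            simp

-- ===== VERDICT (by name: the statement is the Claim_ definition above) =====
theorem normalize_custom_port_syntax_spec : Claim_equal_normalize_custom_port_syntax := by
  intro argv _ hpre
  unfold Spec_normalize_custom_port_syntax normalize_custom_port_syntax_alt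
  exact (pv_main argv.length argv le_rfl hpre []).symm
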